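-- pv_equiv track=rewrite | github.com/egeulgen/Bioinformatics_Stronghold | grph.py | olap_graph
-- ===== SOURCE A (Python) =====
-- def olap_graph(strings, k):
--     ''' Create Overlap Graph
--     :param strings: DNA strings
--     :param k: suffix length
--     :return: adjacency list of Ok
--     '''
--     adj_list = []
--     for name, string in strings.items():
--         for name2, string2 in strings.items():
--             if name != name2:
--                 if string[-k:] == string2[:k]:
--                     adj_list.append((name, name2))
--     return adj_list
-- ===== SOURCE B (Python) =====
-- def olap_graph(strings, k):
--     ''' Create Overlap Graph (prefix-indexed).
--     :param strings: DNA strings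
--     :param k: suffix length
--     :return: adjacency list of Ok
--     '''
--     index = {}
--     for name, string in strings.items():
--         index.setdefault(string[:k], []).append(name)
--     return [(name, name2)
--             for name, string in strings.items()
--             for name2 in index.get(string[-k:], [])
--             if name2 != name]
-- ===== Notes on version B (the rewrite author's own statement) =====
-- stated objective: faster
-- what changed: Replaces A's nested all-pairs scan with a single pass that builds a dict indexing names by k-prefix, then one lookup of each string's k-suffix group instead of an inner loop over all strings.
import Mathlib
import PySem

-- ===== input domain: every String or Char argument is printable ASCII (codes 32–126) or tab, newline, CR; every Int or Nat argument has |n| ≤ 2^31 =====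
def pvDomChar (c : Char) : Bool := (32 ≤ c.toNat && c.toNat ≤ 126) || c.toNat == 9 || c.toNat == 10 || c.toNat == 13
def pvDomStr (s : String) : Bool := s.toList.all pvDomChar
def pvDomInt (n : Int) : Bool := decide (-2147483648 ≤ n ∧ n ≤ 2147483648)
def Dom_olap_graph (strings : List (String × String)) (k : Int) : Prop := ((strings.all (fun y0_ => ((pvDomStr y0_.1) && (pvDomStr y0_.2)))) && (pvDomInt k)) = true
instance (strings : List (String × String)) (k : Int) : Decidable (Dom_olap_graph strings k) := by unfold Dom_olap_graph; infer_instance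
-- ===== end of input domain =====

-- B replaces A's quadratic all-pairs scan by a dict indexing names by k-prefix, looked up by each
-- string's k-suffix (objective: faster, asymptotically fewer string comparisons).

-- ===== PORT A =====
-- string[-k:]
def pvSuf (s : String) (k : Int) : String := PySem.Str.slice s (some (-k)) none
-- string2[:k]
def pvPre (s : String) (k : Int) : String := PySem.Str.slice s none (some k)

def olap_graph (strings : List (String × String)) (k : Int) : List (String × String) :=
  strings.foldl (fun adj_list p =>
    strings.foldl (fun adj_list2 q =>
      if p.1 ≠ q.1 then
        if pvSuf p.2 k = pvPre q.2 k then adj_list2 ++ [(p.1, q.1)] else adj_list2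
      else adj_list2) adj_list) []

-- ===== PORT B =====
def olap_graph_alt (strings : List (String × String)) (k : Int) : List (String × String) :=
  let index : PySem.Dict String (List String) :=
    strings.foldl (fun d p => d.modify (pvPre p.2 k) [] (· ++ [p.1])) PySem.Dict.empty
  strings.flatMap (fun p =>
    ((index.getD (pvSuf p.2 k) []).filter (fun name2 => name2 != p.1)).map (fun name2 => (p.1, name2)))

-- ===== PRECONDITION & SPEC =====
def Spec_olap_graph (strings : List (String × String)) (k : Int) (out : List (String × String)) : Prop := out = olap_graph_alt strings k
instance (strings : List (String × String)) (k : Int) (out : List (String × String)) : Decidable (Spec_olap_graph strings k out) := by unfold Spec_olap_graph; infer_instance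

-- ===== CLAIM (what is proved, stated in full; the proofs are below) =====
def Claim_equal_olap_graph : Prop := ∀ (strings : List (String × String)) (k : Int), Dom_olap_graph strings k → Spec_olap_graph strings k (olap_graph strings k)

-- ===== LEMMAS AND PROOFS =====

-- A's inner loop over all pairs is an append of the filtered matches
theorem pv_inner (strings : List (String × String)) (k : Int) (p : String × String)
    (acc : List (String × String)) :
    strings.foldl (fun adj_list2 q =>
      if p.1 ≠ q.1 then
        if pvSuf p.2 k = pvPre q.2 k then adj_list2 ++ [(p.1, q.1)] else adj_list2
      else adj_list2) acc
    = acc ++ (strings.filter (fun q => decide (p.1 ≠ q.1 ∧ pvSuf p.2 k = pvPre q.2 k))).map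
        (fun q => (p.1, q.1)) := by
  rw [show (fun (adj_list2 : List (String × String)) (q : String × String) =>
      if p.1 ≠ q.1 then
        if pvSuf p.2 k = pvPre q.2 k then adj_list2 ++ [(p.1, q.1)] else adj_list2
      else adj_list2)
    = (fun adj_list2 q =>
      if p.1 ≠ q.1 ∧ pvSuf p.2 k = pvPre q.2 k then adj_list2 ++ [(p.1, q.1)] else adj_list2)
    from by funext a q; split_ifs <;> tauto]
  exact PySem.List.foldl_append_ite _ _ _ _

-- B's index lookup at a key c lists, in order, the names whose string has k-prefix c
theorem pv_index (strings : List (String × String)) (k : Int) (c : String) :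
    (strings.foldl (fun d p => d.modify (pvPre p.2 k) [] (· ++ [p.1]))
        (PySem.Dict.empty : PySem.Dict String (List String))).getD c []
    = (strings.filter (fun q => pvPre q.2 k == c)).map (·.1) := by
  rw [show strings.foldl (fun d p => d.modify (pvPre p.2 k) [] (· ++ [p.1]))
        (PySem.Dict.empty : PySem.Dict String (List String))
      = (strings.map (fun p => (pvPre p.2 k, p.1))).foldl
          (fun d q => d.modify q.1 [] (· ++ [q.2])) PySem.Dict.empty
    from by rw [List.foldl_map]]
  rw [PySem.Dict.getD_foldl_modify_append]
  simp [List.filter_map, Function.comp_def]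

-- ===== VERDICT (by name: the statement is the Claim_ definition above) =====
theorem olap_graph_spec : Claim_equal_olap_graph := by
  intro strings k _
  unfold Spec_olap_graph olap_graph olap_graph_alt
  rw [show (fun (adj_list : List (String × String)) (p : String × String) =>
      strings.foldl (fun adj_list2 q =>
        if p.1 ≠ q.1 then
          if pvSuf p.2 k = pvPre q.2 k then adj_list2 ++ [(p.1, q.1)] else adj_list2
        else adj_list2) adj_list)
    = (fun adj_list p => adj_list ++
        (strings.filter (fun q => decide (p.1 ≠ q.1 ∧ pvSuf p.2 k = pvPre q.2 k))).map
          (fun q => (p.1, q.1)))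
    from by funext a p; exact pv_inner strings k p a]
  rw [PySem.List.foldl_append_eq_flatMap]
  simp only [pv_index, List.nil_append]
  apply List.flatMap_congr
  intro p _
  rw [List.filter_map, List.map_map]
  congr 1
  rw [List.filter_filter]
  apply List.filter_congr
  intro q _
  rw [Bool.eq_iff_iff]
  simp only [Function.comp_def, decide_eq_true_eq, Bool.and_eq_true, beq_iff_eq,
    bne_iff_ne, ne_eq]
  exact ⟨fun ⟨h1, h2⟩ => ⟨fun h => h1 h.symm, h2.symm⟩,
         fun ⟨h1, h2⟩ => ⟨fun h => h1 h.symm, h2.symm⟩⟩
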